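-- pv_equiv track=rewrite | github.com/echo4eva/practice | 301/sum_of_powers_of_three.py | checkPower
-- ===== SOURCE A (Python) =====
-- def checkPower(n):
--     largest_power = 0
--
--     while 3**(largest_power + 1) <= n:
--         largest_power += 1
--
--     sum = 3**largest_power
--
--     while largest_power > 0:
--         largest_power -= 1
--
--         if sum + 3**largest_power <= n:
--             sum += 3**largest_power
--
--     return sum == n
-- ===== SOURCE B (Python) =====
-- def checkPower(n):
--     if n <= 0:
--         return False
--     while n:
--         if n % 3 == 2:
--             return False
--         n //= 3
--     return True
-- ===== Notes on version B (the rewrite author's own statement) =====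
-- stated objective: simpler
-- what changed: B checks that n's base-3 digits are all 0 or 1 via a modulo/floor-division loop instead of A's greedy search for the largest power of 3 followed by downward subtraction with repeated exponentiation.
import Mathlib
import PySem

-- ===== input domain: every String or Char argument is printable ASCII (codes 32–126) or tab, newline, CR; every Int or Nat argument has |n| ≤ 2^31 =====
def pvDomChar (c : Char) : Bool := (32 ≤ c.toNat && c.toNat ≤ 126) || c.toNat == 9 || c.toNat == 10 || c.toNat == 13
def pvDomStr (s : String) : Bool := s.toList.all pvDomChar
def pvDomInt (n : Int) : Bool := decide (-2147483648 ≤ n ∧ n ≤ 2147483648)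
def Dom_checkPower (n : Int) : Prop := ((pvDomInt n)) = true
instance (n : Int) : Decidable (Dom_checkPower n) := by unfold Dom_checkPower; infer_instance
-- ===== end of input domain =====

-- B replaces A's greedy largest-power search and downward subtraction by a base-3 digit
-- check (no digit 2); same return value on every int.

-- ===== PORT A =====
-- first while loop of A: grow largest_power while 3^(largest_power+1) <= n
def findK (n : Int) (k : Nat) : Nat :=
  if (3:Int)^(k+1) ≤ n then findK n (k+1) else k
termination_by n.toNat + 1 - 3^(k+1)
decreasing_by
  rename_i h
  have h1 : ((3^(k+1) : Nat) : Int) ≤ n := by push_cast; exact h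
  have h2 : (3:Nat)^(k+1) < 3^(k+1+1) :=
    Nat.pow_lt_pow_right (by norm_num) (Nat.lt_succ_self _)
  omega

-- second while loop of A: decrement largest_power, greedily add 3^largest_power to sum
def loopA : Nat → Int → Int → Int
  | 0, s, _ => s
  | k+1, s, n => loopA k (if s + (3:Int)^k ≤ n then s + (3:Int)^k else s) n

def checkPower (n : Int) : Bool :=
  let K := findK n 0
  decide (loopA K ((3:Int)^K) n = n)

-- ===== PORT B =====
-- B's while loop; it is entered only for n ≥ 1 (the guard returns False for n ≤ 0),
-- where Python's % and // by 3 agree with Nat.mod / Nat.div, so it is ported over Nat.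
def loopB (m : Nat) : Bool :=
  if h : m ≠ 0 then
    if m % 3 = 2 then false else loopB (m / 3)
  else true
termination_by m
decreasing_by exact Nat.div_lt_self (Nat.pos_of_ne_zero h) (by norm_num)

def checkPower_alt (n : Int) : Bool :=
  if n ≤ 0 then false else loopB n.toNat

-- ===== PRECONDITION & SPEC =====
def Spec_checkPower (n : Int) (out : Bool) : Prop := out = checkPower_alt n
instance (n : Int) (out : Bool) : Decidable (Spec_checkPower n out) := by unfold Spec_checkPower; infer_instance

-- ===== CLAIM (what is proved, stated in full; the proofs are below) =====
def Claim_equal_checkPower : Prop := ∀ (n : Int), Dom_checkPower n → Spec_checkPower n (checkPower n)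

-- ===== LEMMAS AND PROOFS =====

-- remainder view of A's second loop: what is still missing from n after budget k
def fN : Nat → Nat → Nat
  | 0, m => m
  | k+1, m => fN k (if 3^k ≤ m then m - 3^k else m)

lemma loopB_step (m : Nat) : loopB m = if m % 3 = 2 then false else loopB (m / 3) := by
  by_cases h : m = 0
  · subst h; simp [loopB]
  · rw [loopB]; simp [h]

lemma pow3_succ (k : Nat) : (3:Nat)^(k+1) = 3 * 3^k := by ring

lemma no2_sub (k m : Nat) (h1 : 3^k ≤ m) (h2 : m < 2 * 3^k) :
    loopB m = loopB (m - 3^k) := by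
  induction k generalizing m with
  | zero =>
    have hm : m = 1 := by simp at h1 h2; omega
    subst hm; simp [loopB]
  | succ k ih =>
    have hp := pow3_succ k
    rw [loopB_step m, loopB_step (m - 3^(k+1))]
    have hmod : (m - 3^(k+1)) % 3 = m % 3 := by omega
    have hdiv : (m - 3^(k+1)) / 3 = m / 3 - 3^k := by omega
    rw [hmod, hdiv]
    by_cases hc : m % 3 = 2
    · simp [hc]
    · simp only [hc, if_false]
      exact ih (m / 3) (by omega) (by omega)

lemma no2_two (k m : Nat) (h1 : 2 * 3^k ≤ m) (h2 : m < 3^(k+1)) :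
    loopB m = false := by
  induction k generalizing m with
  | zero =>
    have hm : m = 2 := by simp at h1 h2 ⊢; omega
    subst hm; simp [loopB]
  | succ k ih =>
    have hp := pow3_succ k
    have hp2 := pow3_succ (k+1)
    rw [loopB_step m]
    by_cases hc : m % 3 = 2
    · simp [hc]
    · simp only [hc, if_false]
      exact ih (m / 3) (by omega) (by omega)

lemma fN_zero_iff (k m : Nat) : fN k m = 0 ↔ (m < 3^k ∧ loopB m = true) := by
  induction k generalizing m with
  | zero =>
    constructor
    · rintro rfl; exact ⟨by norm_num, by simp [loopB]⟩
    · rintro ⟨h, -⟩; simpa using h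
  | succ k ih =>
    have hp := pow3_succ k
    show fN k (if 3^k ≤ m then m - 3^k else m) = 0 ↔ _
    by_cases h : 3^k ≤ m
    · rw [if_pos h, ih]
      by_cases hA : m < 2 * 3^k
      · rw [no2_sub k m h hA]
        constructor
        · rintro ⟨-, hb⟩; exact ⟨by omega, hb⟩
        · rintro ⟨-, hb⟩; exact ⟨by omega, hb⟩
      · by_cases hB : m < 3^(k+1)
        · constructor
          · rintro ⟨hlt, -⟩; omega
          · rintro ⟨-, hb⟩; rw [no2_two k m (by omega) hB] at hb; cases hb
        · constructor
          · rintro ⟨hlt, -⟩; omega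
          · rintro ⟨hlt, -⟩; omega
    · rw [if_neg h, ih]
      constructor
      · rintro ⟨-, hb⟩; exact ⟨by omega, hb⟩
      · rintro ⟨-, hb⟩; exact ⟨by omega, hb⟩

lemma loopA_eq (k : Nat) : ∀ (s n : Int), 0 ≤ s → s ≤ n →
    loopA k s n = n - (fN k (n - s).toNat : Int) := by
  induction k with
  | zero => intro s n h0 h1; show s = n - _; show s = n - ((n - s).toNat : Int); omega
  | succ k ih =>
    intro s n h0 h1
    have hp : ((3^k : Nat) : Int) = (3:Int)^k := by push_cast; ring
    show loopA k (if s + (3:Int)^k ≤ n then s + (3:Int)^k else s) n = n - (fN k (if 3^k ≤ (n-s).toNat then (n-s).toNat - 3^k else (n-s).toNat) : Int)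
    by_cases hc : s + (3:Int)^k ≤ n
    · rw [if_pos hc, if_pos (by omega), ih (s + 3^k) n (add_nonneg h0 (by positivity)) hc,
        show (n - (s + (3:Int)^k)).toNat = (n - s).toNat - 3^k from by omega]
    · rw [if_neg hc, if_neg (by omega), ih s n h0 h1]

lemma findK_inv (n : Int) (k : Nat) (h : (3:Int)^k ≤ n) :
    (3:Int)^(findK n k) ≤ n ∧ n < 3^(findK n k + 1) := by
  rw [findK]
  split
  · exact findK_inv n (k+1) ‹_›
  · exact ⟨h, lt_of_not_ge ‹_›⟩
termination_by n.toNat + 1 - 3^(k+1)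
decreasing_by
  rename_i h'
  have h1 : ((3^(k+1) : Nat) : Int) ≤ n := by push_cast; exact h'
  have h2 : (3:Nat)^(k+1) < 3^(k+1+1) :=
    Nat.pow_lt_pow_right (by norm_num) (Nat.lt_succ_self _)
  omega

lemma findK_nonpos (n : Int) (h : n ≤ 0) : findK n 0 = 0 := by
  rw [findK, if_neg]
  norm_num
  omega

-- ===== VERDICT (by name: the statement is the Claim_ definition above) =====
theorem checkPower_spec : Claim_equal_checkPower := by
  intro n _
  show checkPower n = checkPower_alt n
  by_cases hn : n ≤ 0
  · rw [checkPower, checkPower_alt, if_pos hn, findK_nonpos n hn]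
    show decide (loopA 0 ((3:Int)^0) n = n) = false
    show decide ((3:Int)^0 = n) = false
    simp; omega
  · have hn' : 1 ≤ n := by omega
    rw [checkPower, checkPower_alt, if_neg (by omega)]
    set K := findK n 0 with hK
    obtain ⟨hlo, hhi⟩ := findK_inv n 0 (by simpa using hn')
    rw [← hK] at hlo hhi
    have hp : ((3^K : Nat) : Int) = (3:Int)^K := by push_cast; ring
    have hp1 : ((3^(K+1) : Nat) : Int) = (3:Int)^(K+1) := by push_cast; ring
    have hps : (3:Nat)^(K+1) = 3 * 3^K := pow3_succ K
    rw [loopA_eq K ((3:Int)^K) n (by positivity) hlo]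
    set m0 := (n - (3:Int)^K).toNat with hm0
    have hN : n.toNat = 3^K + m0 := by omega
    have hm0lt : m0 < 2 * 3^K := by omega
    have hiff : (n - (fN K m0 : Int) = n) ↔ fN K m0 = 0 := by omega
    by_cases hsm : m0 < 3^K
    · -- n.toNat ∈ [3^K, 2*3^K): top digit 1, strip it
      have hsub : loopB n.toNat = loopB m0 := by
        have := no2_sub K n.toNat (by omega) (by omega)
        rwa [show n.toNat - 3^K = m0 by omega] at this
      rw [hsub]
      rcases hb : loopB m0 with _ | _
      · simp only [decide_eq_false_iff_not]
        rw [hiff, fN_zero_iff]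
        rintro ⟨-, h⟩; rw [hb] at h; cases h
      · simp only [decide_eq_true_iff]
        rw [hiff, fN_zero_iff]
        exact ⟨hsm, hb⟩
    · -- n.toNat ∈ [2*3^K, 3^(K+1)): digit 2, both sides false
      rw [no2_two K n.toNat (by omega) (by omega)]
      simp only [decide_eq_false_iff_not]
      rw [hiff, fN_zero_iff]
      rintro ⟨h, -⟩; omega
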